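-- pv_equiv track=rewrite | github.com/sergiublaj/advent-of-code-2023 | day01/day01.py | get_digit_index
-- ===== SOURCE A (Python) =====
-- def get_digit_index(s, is_first):
--     n = len(s)
--     idx = -1
--     for i in range(n):
--         if not s[i].isdigit():
--             continue
--         if is_first:
--             return i
--         idx = i
--
--     return idx
-- ===== SOURCE B (Python) =====
-- def get_digit_index(s, is_first):
--     digit_positions = [i for i, c in enumerate(s) if c.isdigit()]
--     if not digit_positions:
--         return -1
--     return digit_positions[0] if is_first else digit_positions[-1]
-- ===== Notes on version B (the rewrite author's own statement) =====
-- stated objective: simpler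
-- what changed: B replaces A's branch-inside-loop (early return for first, running idx for last) with one collect-then-select pass: build the list of all digit indices, then pick its head, its last element, or -1.
import Mathlib
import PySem

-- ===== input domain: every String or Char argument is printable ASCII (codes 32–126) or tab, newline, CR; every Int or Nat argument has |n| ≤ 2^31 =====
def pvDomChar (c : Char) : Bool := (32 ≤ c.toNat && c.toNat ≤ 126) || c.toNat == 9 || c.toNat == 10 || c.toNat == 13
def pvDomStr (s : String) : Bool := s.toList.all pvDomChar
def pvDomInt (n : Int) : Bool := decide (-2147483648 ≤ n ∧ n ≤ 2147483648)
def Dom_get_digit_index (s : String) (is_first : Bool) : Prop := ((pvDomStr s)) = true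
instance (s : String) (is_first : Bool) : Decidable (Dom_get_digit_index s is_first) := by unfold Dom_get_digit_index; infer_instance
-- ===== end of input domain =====

-- B replaces A's branch-inside-loop (early return for first / running idx for last) with one
-- collect-then-select pass: build the list of all digit indices, then select head / last / -1.

-- ===== PORT A =====
-- the for-loop over range(n) with early return: recursion over the characters with the index i
def pvALoop (cs : List Char) (i : Int) (is_first : Bool) (idx : Int) : Int :=
  match cs with
  | [] => idx
  | c :: rest =>
    if !(PySem.Chars.isdigit c) then pvALoop rest (i + 1) is_first idx
    else if is_first then i
    else pvALoop rest (i + 1) is_first i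

def get_digit_index (s : String) (is_first : Bool) : Int :=
  pvALoop s.toList 0 is_first (-1)

-- ===== PORT B =====
def get_digit_index_alt (s : String) (is_first : Bool) : Int :=
  let digit_positions : List Int :=
    (PySem.List.enumerate s.toList).filterMap
      (fun p => if PySem.Chars.isdigit p.2 then some p.1 else none)
  match digit_positions with
  | [] => -1
  | x :: xs => if is_first then x else (x :: xs).getLast (by simp)

-- ===== PRECONDITION & SPEC =====
def Spec_get_digit_index (s : String) (is_first : Bool) (out : Int) : Prop := out = get_digit_index_alt s is_first
instance (s : String) (is_first : Bool) (out : Int) : Decidable (Spec_get_digit_index s is_first out) := by unfold Spec_get_digit_index; infer_instance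

-- ===== CLAIM (what is proved, stated in full; the proofs are below) =====
def Claim_equal_get_digit_index : Prop := ∀ (s : String) (is_first : Bool), Dom_get_digit_index s is_first → Spec_get_digit_index s is_first (get_digit_index s is_first)

-- ===== LEMMAS AND PROOFS =====

-- the digit-index list B builds, as a recursion with a starting index
def pvDs (cs : List Char) (i : Int) : List Int :=
  match cs with
  | [] => []
  | c :: rest => if PySem.Chars.isdigit c then i :: pvDs rest (i + 1) else pvDs rest (i + 1)

theorem pvDs_eq_filterMap (cs : List Char) (i : Int) :
    (PySem.List.enumerate cs i).filterMap
      (fun p => if PySem.Chars.isdigit p.2 then some p.1 else none) = pvDs cs i := by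
  induction cs generalizing i with
  | nil => simp [pvDs, PySem.List.enumerate_nil]
  | cons c rest ih =>
    simp only [pvDs, PySem.List.enumerate_cons, List.filterMap_cons]
    by_cases h : PySem.Chars.isdigit c <;> simp [h, ih]

theorem pvALoop_true (cs : List Char) (i : Int) (idx : Int) :
    pvALoop cs i true idx = (pvDs cs i).headD idx := by
  induction cs generalizing i idx with
  | nil => simp [pvALoop, pvDs]
  | cons c rest ih =>
    simp only [pvALoop, pvDs]
    by_cases h : PySem.Chars.isdigit c <;> simp [h, ih]

theorem pvALoop_false (cs : List Char) (i : Int) (idx : Int) :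
    pvALoop cs i false idx = (pvDs cs i).getLastD idx := by
  induction cs generalizing i idx with
  | nil => simp [pvALoop, pvDs]
  | cons c rest ih =>
    simp only [pvALoop, pvDs]
    by_cases h : PySem.Chars.isdigit c
    · simp only [h, Bool.not_true, Bool.false_eq_true, if_false, if_true]
      rw [ih, List.getLastD_cons]
    · simp [h, ih]

-- ===== VERDICT (by name: the statement is the Claim_ definition above) =====
theorem get_digit_index_spec : Claim_equal_get_digit_index := by
  intro s is_first _
  unfold Spec_get_digit_index get_digit_index get_digit_index_alt
  rw [pvDs_eq_filterMap]
  cases is_first with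
  | false =>
    rw [pvALoop_false]
    cases pvDs s.toList 0 with
    | nil => simp
    | cons x xs => simp [List.getLastD_eq_getLast?, List.getLast?_eq_some_getLast]
  | true =>
    rw [pvALoop_true]
    cases pvDs s.toList 0 <;> simp
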